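-- pv_equiv track=rewrite | github.com/damianoimola/fundamentals-of-it-exercises | pre_practical_exam_function.py | string_list_to_upper
-- ===== SOURCE A (Python) =====
-- def string_list_to_upper(L, n):
--     # @param L : list
--     # @param n : Int
--     # @return list
--     if len(L) == 0:
--         return L
--     else:
--         if len(L[0]) == n:
--             return [L[0].upper()] + string_list_to_upper(L[1:], n)
--         else:
--             return [L[0]] + string_list_to_upper(L[1:], n)
-- ===== SOURCE B (Python) =====
-- def string_list_to_upper(L, n):
--     result = []
--     for s in L:
--         if len(s) == n:
--             result.append(s.upper())
--         else:
--             result.append(s)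
--     return result
-- ===== Notes on version B (the rewrite author's own statement) =====
-- stated objective: faster
-- what changed: Replaces the linear recursion with tail slicing and repeated list concatenation by a single iterative pass appending to an accumulator list.
import Mathlib
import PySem

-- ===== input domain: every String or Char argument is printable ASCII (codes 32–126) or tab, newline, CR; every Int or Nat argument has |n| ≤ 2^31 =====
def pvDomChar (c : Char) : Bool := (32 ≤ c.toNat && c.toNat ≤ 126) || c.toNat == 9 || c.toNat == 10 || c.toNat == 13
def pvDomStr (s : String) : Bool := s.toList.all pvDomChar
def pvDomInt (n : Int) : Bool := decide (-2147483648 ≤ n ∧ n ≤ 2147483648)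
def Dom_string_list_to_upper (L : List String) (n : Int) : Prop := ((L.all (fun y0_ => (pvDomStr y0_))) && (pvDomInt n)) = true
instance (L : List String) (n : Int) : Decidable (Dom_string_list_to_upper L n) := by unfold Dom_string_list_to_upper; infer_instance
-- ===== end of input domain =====

-- B replaces A's linear recursion with tail slicing and list concatenation by one iterative pass over an accumulator (objective: simpler).

-- ===== PORT A =====
def string_list_to_upper (L : List String) (n : Int) : List String :=
  match L with
  | [] => L
  | x :: rest =>
    if PySem.Str.len x = n then
      [PySem.Str.upper x] ++ string_list_to_upper rest n
    else
      [x] ++ string_list_to_upper rest n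

-- ===== PORT B =====
def string_list_to_upper_alt (L : List String) (n : Int) : List String :=
  L.foldl (fun result s =>
    if PySem.Str.len s = n then result ++ [PySem.Str.upper s] else result ++ [s]) []

-- ===== PRECONDITION & SPEC =====
def Spec_string_list_to_upper (L : List String) (n : Int) (out : List String) : Prop := out = string_list_to_upper_alt L n
instance (L : List String) (n : Int) (out : List String) : Decidable (Spec_string_list_to_upper L n out) := by unfold Spec_string_list_to_upper; infer_instance

-- ===== CLAIM (what is proved, stated in full; the proofs are below) =====
def Claim_equal_string_list_to_upper : Prop := ∀ (L : List String) (n : Int), Dom_string_list_to_upper L n → Spec_string_list_to_upper L n (string_list_to_upper L n)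

-- ===== LEMMAS AND PROOFS =====

-- the fold's accumulator commutes out as a prefix
theorem string_list_to_upper_alt_acc (L : List String) (n : Int) (acc : List String) :
    L.foldl (fun result s =>
      if PySem.Str.len s = n then result ++ [PySem.Str.upper s] else result ++ [s]) acc
    = acc ++ string_list_to_upper_alt L n := by
  induction L generalizing acc with
  | nil => simp [string_list_to_upper_alt]
  | cons x rest ih =>
    simp only [string_list_to_upper_alt, List.foldl_cons]
    rw [ih, ih ((if PySem.Str.len x = n then _ else _))]
    split_ifs <;> simp

-- ===== VERDICT (by name: the statement is the Claim_ definition above) =====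
theorem string_list_to_upper_eq (L : List String) (n : Int) :
    string_list_to_upper L n = string_list_to_upper_alt L n := by
  induction L with
  | nil => rfl
  | cons x rest ih =>
    simp only [string_list_to_upper, string_list_to_upper_alt, List.foldl_cons]
    rw [string_list_to_upper_alt_acc]
    split_ifs <;> simp [ih]

theorem string_list_to_upper_spec : Claim_equal_string_list_to_upper :=
  fun L n _ => string_list_to_upper_eq L n
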